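-- pv_equiv track=rewrite | github.com/cjolivier01/HockeyMOM | src/hmlib/analytics/ds_io.py | remove_one_digit_numbers
-- ===== SOURCE A (Python) =====
-- from typing import Any, Dict, List, Set, Tuple
--
-- def remove_one_digit_numbers(numbers: List[int]) -> List[int]:
--     # Split numbers into one-digit and two-digit groups
--     one_digit: List[int] = [num for num in numbers if num < 10]
--     two_digit: List[int] = [num for num in numbers if num >= 10]
--
--     # Convert two-digit numbers to strings for digit comparison
--     two_digit_str: List[str] = [str(num) for num in two_digit]
--
--     # Filter out one-digit numbers that appear in any two-digit number
--     filtered_one_digit: List[int] = [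
--         num for num in one_digit if not any(str(num) in tds for tds in two_digit_str)
--     ]
--
--     # Combine the lists to form the final result
--     return filtered_one_digit + two_digit
-- ===== SOURCE B (Python) =====
-- def remove_one_digit_numbers(numbers):
--     # Arithmetic digit bitmask: no string conversion at all. A one-digit candidate n
--     # (n < 10) is removed by the spec iff 0 <= n <= 9 and the digit n occurs in the
--     # decimal expansion of some number >= 10 (negatives are always kept: '-' never
--     # occurs in str(m) for m >= 10).
--     mask = 0
--     two_digit = []
--     for n in numbers:
--         if n >= 10:
--             two_digit.append(n)
--             m = n
--             while m:
--                 mask |= 1 << (m % 10)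
--                 m //= 10
--     return [n for n in numbers if n < 10 and (n < 0 or not (mask >> n) & 1)] + two_digit
-- ===== Notes on version B (the rewrite author's own statement) =====
-- stated objective: faster
-- what changed: B drops all string work: instead of converting numbers to strings and scanning every >=10 number's string for each one-digit candidate, it builds a 10-bit digit bitmask of the >=10 numbers arithmetically (%10, //10) in one pass, keeps negatives unconditionally (a '-' can never be a substring of str(m) for m>=10), and decides each candidate 0..9 by one bit probe.
import Mathlib
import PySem

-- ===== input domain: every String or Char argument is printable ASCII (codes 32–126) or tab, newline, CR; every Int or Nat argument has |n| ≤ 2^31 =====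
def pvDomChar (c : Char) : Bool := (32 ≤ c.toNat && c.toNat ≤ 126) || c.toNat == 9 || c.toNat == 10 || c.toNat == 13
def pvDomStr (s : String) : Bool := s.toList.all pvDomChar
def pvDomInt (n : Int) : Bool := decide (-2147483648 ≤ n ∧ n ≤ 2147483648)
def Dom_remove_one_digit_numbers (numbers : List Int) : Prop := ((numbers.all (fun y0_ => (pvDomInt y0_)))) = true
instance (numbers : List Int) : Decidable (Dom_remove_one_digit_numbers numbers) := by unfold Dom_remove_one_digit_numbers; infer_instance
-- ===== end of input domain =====

-- B replaces A's string conversions and per-candidate substring scans with pure arithmetic: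
-- one pass builds a 10-bit digit bitmask of the numbers >= 10 (repeated %10, //10), and each
-- one-digit candidate is decided by a single bit probe (objective: alternative).

-- ===== PORT A =====
def remove_one_digit_numbers (numbers : List Int) : List Int :=
  let one_digit : List Int := numbers.filter (fun num => decide (num < 10))
  let two_digit : List Int := numbers.filter (fun num => decide (10 ≤ num))
  let two_digit_str : List String := two_digit.map (fun num => PySem.Int.toStr num)
  let filtered_one_digit : List Int :=
    one_digit.filter (fun num =>
      !(two_digit_str.any (fun tds => PySem.Str.isIn (PySem.Int.toStr num) tds)))
  filtered_one_digit ++ two_digit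

-- ===== PORT B =====
-- the inner `while m: mask |= 1 << (m % 10); m //= 10` loop of Source B; m is a nonnegative int
-- there (it starts at n ≥ 10), so Nat arithmetic is exact
def pvDigitMask (m mask : Nat) : Nat :=
  if h : m = 0 then mask else pvDigitMask (m / 10) (mask ||| (1 <<< (m % 10)))
termination_by m
decreasing_by exact Nat.div_lt_self (Nat.pos_of_ne_zero h) (by norm_num)

def remove_one_digit_numbers_alt (numbers : List Int) : List Int :=
  -- for n in numbers: if n >= 10: two_digit.append(n); <inner while loop on mask>
  let st : Nat × List Int :=
    numbers.foldl
      (fun st n => if 10 ≤ n then (pvDigitMask n.toNat st.1, st.2 ++ [n]) else st)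
      (0, ([] : List Int))
  -- `n < 0 or not (mask >> n) & 1` (for 0 ≤ n < 10 the shift count n is a small Nat)
  (numbers.filter (fun n =>
      decide (n < 10) && (decide (n < 0) || ((st.1 >>> n.toNat) &&& 1 == 0))))
    ++ st.2

-- ===== PRECONDITION & SPEC =====
def Spec_remove_one_digit_numbers (numbers : List Int) (out : List Int) : Prop :=
  out = remove_one_digit_numbers_alt numbers
instance (numbers : List Int) (out : List Int) : Decidable (Spec_remove_one_digit_numbers numbers out) := by
  unfold Spec_remove_one_digit_numbers; infer_instance

-- ===== CLAIM =====
def Claim_equal_remove_one_digit_numbers : Prop :=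
  ∀ (numbers : List Int), Dom_remove_one_digit_numbers numbers →
    Spec_remove_one_digit_numbers numbers (remove_one_digit_numbers numbers)

-- ===== LEMMAS AND PROOFS =====

lemma digitChar_inj10 {a b : Nat} (ha : a < 10) (hb : b < 10) :
    Nat.digitChar a = Nat.digitChar b ↔ a = b := by
  interval_cases a <;> interval_cases b <;> decide

lemma digitChar_ne_dash10 {a : Nat} (ha : a < 10) : Nat.digitChar a ≠ '-' := by
  interval_cases a <;> decide

-- `Nat.toDigits` written through Mathlib's `Nat.digits`
lemma toDigitsCore_eq :
    ∀ (f n : Nat) (l : List Char), n < f → 0 < n →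
      Nat.toDigitsCore 10 f n l = ((Nat.digits 10 n).map Nat.digitChar).reverse ++ l := by
  intro f
  induction f with
  | zero => intro n l h _; omega
  | succ f ih =>
    intro n l hf hn
    simp only [Nat.toDigitsCore]
    rw [Nat.digits_def' (by norm_num : 1 < 10) hn]
    by_cases h : n / 10 = 0
    · rw [if_pos h, h, Nat.digits_zero]
      simp
    · rw [if_neg h]
      have hlt : n / 10 < n := Nat.div_lt_self hn (by norm_num)
      rw [ih (n / 10) _ (by omega) (Nat.pos_of_ne_zero h)]
      simp

lemma toDigits_eq (n : Nat) (hn : 0 < n) :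
    Nat.toDigits 10 n = ((Nat.digits 10 n).map Nat.digitChar).reverse := by
  unfold Nat.toDigits
  rw [toDigitsCore_eq (n + 1) n [] (by omega) hn, List.append_nil]

lemma toDigits_single (k : Nat) (hk : k < 10) : Nat.toDigits 10 k = [Nat.digitChar k] := by
  interval_cases k <;> decide

lemma mem_toDigits_iff {m k : Nat} (hm : 0 < m) (hk : k < 10) :
    Nat.digitChar k ∈ Nat.toDigits 10 m ↔ k ∈ Nat.digits 10 m := by
  rw [toDigits_eq m hm, List.mem_reverse, List.mem_map]
  constructor
  · rintro ⟨d, hd, hdk⟩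
    have hdlt : d < 10 := Nat.digits_lt_base (by norm_num) hd
    exact ((digitChar_inj10 hdlt hk).mp hdk) ▸ hd
  · intro h; exact ⟨k, h, rfl⟩

lemma dash_not_mem_toDigits (m : Nat) (hm : 0 < m) : '-' ∉ Nat.toDigits 10 m := by
  rw [toDigits_eq m hm]
  intro h
  rcases List.mem_map.mp (List.mem_reverse.mp h) with ⟨d, hd, hdash⟩
  exact digitChar_ne_dash10 (Nat.digits_lt_base (by norm_num) hd) hdash

-- bit probe `(M >> k) & 1 == 0` is the complement of `testBit`
lemma bit_probe_eq (M k : Nat) : ((M >>> k) &&& 1 == 0) = !M.testBit k := by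
  simp only [Nat.testBit, Nat.and_comm]
  rcases Nat.mod_two_eq_zero_or_one (M >>> k) with h | h <;> simp [Nat.and_one_is_mod, h]

lemma testBit_one_shift (d k : Nat) : ((1 <<< d) : Nat).testBit k = decide (k = d) := by
  rw [Nat.shiftLeft_eq, one_mul, Nat.testBit_two_pow]
  by_cases h : d = k <;> simp [h, eq_comm]

lemma testBit_pvDigitMask :
    ∀ (m mask k : Nat), k < 10 →
      (pvDigitMask m mask).testBit k = (mask.testBit k || decide (k ∈ Nat.digits 10 m)) := by
  intro m
  induction m using Nat.strong_induction_on with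
  | _ m ih =>
    intro mask k hk
    rw [pvDigitMask]
    by_cases h : m = 0
    · simp [h]
    · rw [dif_neg h,
        ih (m / 10) (Nat.div_lt_self (Nat.pos_of_ne_zero h) (by norm_num)) _ k hk,
        Nat.testBit_or, testBit_one_shift]
      have hd : Nat.digits 10 m = m % 10 :: Nat.digits 10 (m / 10) :=
        Nat.digits_def' (by norm_num : 1 < 10) (Nat.pos_of_ne_zero h)
      simp [hd, Bool.or_assoc]

lemma testBit_foldl_mask :
    ∀ (L : List Int) (mask k : Nat), k < 10 →
      (L.foldl (fun mk n => pvDigitMask n.toNat mk) mask).testBit k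
        = (mask.testBit k || L.any (fun n => decide (k ∈ Nat.digits 10 n.toNat))) := by
  intro L
  induction L with
  | nil => intro mask k _; simp
  | cons x xs ih =>
    intro mask k hk
    simp only [List.foldl_cons, List.any_cons]
    rw [ih _ k hk, testBit_pvDigitMask x.toNat mask k hk, Bool.or_assoc]

lemma foldl_pair :
    ∀ (xs : List Int) (mask : Nat) (acc : List Int),
      xs.foldl (fun (st : Nat × List Int) n =>
          if 10 ≤ n then (pvDigitMask n.toNat st.1, st.2 ++ [n]) else st) (mask, acc)
        = ((xs.filter (fun n => decide (10 ≤ n))).foldl (fun mk n => pvDigitMask n.toNat mk) mask,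
           acc ++ xs.filter (fun n => decide (10 ≤ n))) := by
  intro xs
  induction xs with
  | nil => intro mask acc; simp
  | cons x xs ih =>
    intro mask acc
    by_cases h : (10 : Int) ≤ x
    · simp [h, ih]
    · simp [h, ih]

lemma any_congr_mem {α : Type} : ∀ (L : List α) (f g : α → Bool),
    (∀ x ∈ L, f x = g x) → L.any f = L.any g := by
  intro L f g h
  induction L with
  | nil => rfl
  | cons x xs ih =>
    simp only [List.any_cons, h x (by simp), ih (fun y hy => h y (by simp [hy]))]

-- the two keep-conditions agree on every one-digit candidate
lemma cond_eq (n : Int) (hn : n < 10) (L : List Int) (hL : ∀ m ∈ L, (10:Int) ≤ m) :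
    (!(L.map (fun m => PySem.Int.toStr m)).any
        (fun tds => PySem.Str.isIn (PySem.Int.toStr n) tds))
      = (decide (n < 0)
          || (((L.foldl (fun mk m => pvDigitMask m.toNat mk) 0) >>> n.toNat) &&& 1 == 0)) := by
  have hmpos : ∀ m ∈ L, 0 < m.toNat := by intro m hm; have := hL m hm; omega
  by_cases hneg : n < 0
  · -- str(n) starts with '-': never a substring of str(m), m ≥ 10; both sides keep n
    have hany : (L.map (fun m => PySem.Int.toStr m)).any
        (fun tds => PySem.Str.isIn (PySem.Int.toStr n) tds) = false := by
      rw [List.any_eq_false]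
      intro tds htds
      rcases List.mem_map.mp htds with ⟨m, hm, rfl⟩
      rw [Bool.not_eq_true, ← Bool.not_eq_true] at *
      intro hin
      have hinf := (PySem.Str.isIn_iff_infix _ _).mp hin
      rw [PySem.Int.toList_toStr, PySem.Int.toList_toStr] at hinf
      have hdash : '-' ∈ PySem.Int.toChars n := by simp [PySem.Int.toChars, hneg]
      have hmem : '-' ∈ PySem.Int.toChars m := hinf.mem hdash
      have hmnn : ¬ m < 0 := by have := hL m hm; omega
      rw [show PySem.Int.toChars m = Nat.toDigits 10 m.toNat by simp [PySem.Int.toChars, hmnn]]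
        at hmem
      exact dash_not_mem_toDigits m.toNat (hmpos m hm) hmem
    rw [hany, decide_eq_true hneg]
    rfl
  · -- 0 ≤ n < 10: substring test = digit membership = mask bit
    have hk : n.toNat < 10 := by omega
    have hstr : ∀ m ∈ L,
        PySem.Str.isIn (PySem.Int.toStr n) (PySem.Int.toStr m)
          = decide (n.toNat ∈ Nat.digits 10 m.toNat) := by
      intro m hm
      have hmnn : ¬ m < 0 := by have := hL m hm; omega
      rw [Bool.eq_iff_iff, PySem.Str.isIn_iff_infix,
          PySem.Int.toList_toStr, PySem.Int.toList_toStr,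
          show PySem.Int.toChars n = [Nat.digitChar n.toNat] by
            simp [PySem.Int.toChars, hneg, toDigits_single n.toNat hk],
          show PySem.Int.toChars m = Nat.toDigits 10 m.toNat by
            simp [PySem.Int.toChars, hmnn],
          List.singleton_infix_iff, mem_toDigits_iff (hmpos m hm) hk, decide_eq_true_iff]
    rw [bit_probe_eq, testBit_foldl_mask L 0 n.toNat hk, Nat.zero_testBit, Bool.false_or,
        decide_eq_false hneg, Bool.false_or]
    congr 1
    rw [List.any_map]
    exact any_congr_mem L _ _ (fun m hm => hstr m hm)

-- ===== VERDICT =====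
theorem remove_one_digit_numbers_spec : Claim_equal_remove_one_digit_numbers := by
  intro numbers _
  unfold Spec_remove_one_digit_numbers remove_one_digit_numbers remove_one_digit_numbers_alt
  simp only []
  rw [foldl_pair numbers 0 []]
  simp only [List.nil_append]
  rw [List.filter_filter]
  congr 1
  apply List.filter_congr
  intro x _
  by_cases hx : x < 10
  · simp only [decide_eq_true hx, Bool.true_and, Bool.and_true]
    exact cond_eq x hx _ (fun m hm => of_decide_eq_true (List.mem_filter.mp hm).2)
  · simp [hx]
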